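-- pv_equiv track=rewrite | github.com/dfurley/ONS_readability_scoring | scripts/text_analysis_functions.py | word_syllable_count
-- ===== SOURCE A (Python) =====
-- def word_syllable_count(word):
--     """
--     Function to count syllables in a word
--
--     Parameters
--     ----------
--     word : string
--         DESCRIPTION.
--
--     Returns
--     -------
--     count : int
--         Count of syllables in a given word.
--
--     """
--     word = word.lower()
--     count = 0
--     vowels = "aeiouy"
--     if word[0] in vowels:
--         count += 1
--     for index in range(1, len(word)):
--         if word[index] in vowels and word[index - 1] not in vowels:
--             count += 1
--     if word.endswith("e"):
--         count -= 1
--     if word.endswith("le"):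
--         count += 1
--     if count == 0:
--         count += 1
--     return count
-- ===== SOURCE B (Python) =====
-- def word_syllable_count(word):
--     """Count heuristic syllables: blank out every non-vowel to a space, let
--     str.split() cut the result into the maximal vowel runs, count them, then
--     apply the ending adjustments arithmetically."""
--     w = word.lower()
--     mask = ''.join(c if c in "aeiouy" else ' ' for c in w)
--     count = len(mask.split()) + (1 if w.endswith("le") else 0) - (1 if w.endswith("e") else 0)
--     return max(count, 1)
-- ===== Notes on version B (the rewrite author's own statement) =====
-- stated objective: alternative
-- what changed: Replaces A's index loop comparing word[index] with word[index-1] by a staged pipeline: map every non-vowel to a space, let str.split() cut the masked string into the maximal vowel runs, take the number of runs, and fold the three ending adjustments into one arithmetic expression with max(count, 1).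
-- crash fix: On the empty string A raises IndexError (word[0]); B returns 1. — e.g. on word_syllable_count(""): A raises IndexError, B returns 1
import Mathlib
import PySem

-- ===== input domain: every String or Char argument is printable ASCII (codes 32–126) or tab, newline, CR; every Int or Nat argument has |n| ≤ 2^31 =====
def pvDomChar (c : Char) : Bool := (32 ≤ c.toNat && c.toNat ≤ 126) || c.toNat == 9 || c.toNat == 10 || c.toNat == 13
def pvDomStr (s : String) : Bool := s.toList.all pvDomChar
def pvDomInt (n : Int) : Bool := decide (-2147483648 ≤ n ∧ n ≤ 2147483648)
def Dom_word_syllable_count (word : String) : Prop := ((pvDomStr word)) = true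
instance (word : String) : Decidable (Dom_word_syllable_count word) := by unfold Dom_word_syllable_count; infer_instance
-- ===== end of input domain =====

-- B replaces A's index loop (word[index] vs word[index-1]) by a staged pipeline: mask every
-- non-vowel to a space, split() the mask into the maximal vowel runs, count them, and fold the
-- ending adjustments into one arithmetic expression with max(count, 1): an alternative mechanism.

def pvVowels : List Char := ['a', 'e', 'i', 'o', 'u', 'y']

-- ===== PORT A =====
-- word[0] raises IndexError on the empty string: Pre_ excludes ""; the pyGetD default is unreachable there.
def word_syllable_count (word : String) : Int :=
  let w := PySem.Chars.lower word.toList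
  let count : Int := if PySem.List.pyGetD w 0 ' ' ∈ pvVowels then 1 else 0
  let count := (PySem.List.pyRange 1 (PySem.List.len w) 1).foldl
      (fun acc i =>
        if PySem.List.pyGetD w i ' ' ∈ pvVowels ∧ PySem.List.pyGetD w (i - 1) ' ' ∉ pvVowels then
          acc + 1 else acc) count
  let count := if PySem.Chars.endswith w ['e'] then count - 1 else count
  let count := if PySem.Chars.endswith w ['l', 'e'] then count + 1 else count
  if count = 0 then count + 1 else count

-- ===== PORT B =====
def word_syllable_count_alt (word : String) : Int :=
  let w := PySem.Chars.lower word.toList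
  let mask := w.map (fun c => if c ∈ pvVowels then c else ' ')
  let count : Int := ((PySem.Chars.split₀ mask).length : Int)
      + (if PySem.Chars.endswith w ['l', 'e'] then (1 : Int) else 0)
      - (if PySem.Chars.endswith w ['e'] then (1 : Int) else 0)
  max count 1

-- ===== PRECONDITION & SPEC =====
-- Pre_ excludes exactly the empty string, where A raises IndexError at word[0].
def Pre_word_syllable_count (word : String) : Prop := word ≠ ""
instance (word : String) : Decidable (Pre_word_syllable_count word) := by
  unfold Pre_word_syllable_count; infer_instance
def pvWitness_word_syllable_count : String := "hello"

-- On the empty string A raises IndexError (word[0]); B returns 1.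
def Raises_word_syllable_count (word : String) : Prop := word = ""
instance (word : String) : Decidable (Raises_word_syllable_count word) := by
  unfold Raises_word_syllable_count; infer_instance
def pvRaiseWitness_word_syllable_count : String := ""
def pvRaiseWitnessOut_word_syllable_count : Int := 1

def Spec_word_syllable_count (word : String) (out : Int) : Prop := out = word_syllable_count_alt word
instance (word : String) (out : Int) : Decidable (Spec_word_syllable_count word out) := by
  unfold Spec_word_syllable_count; infer_instance

-- ===== CLAIM (what is proved, stated in full; the proofs are below) =====
def Claim_equal_word_syllable_count : Prop := ∀ (word : String), Dom_word_syllable_count word → Pre_word_syllable_count word → Spec_word_syllable_count word (word_syllable_count word)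
def Claim_raises_word_syllable_count : Prop := (∀ (word : String), Dom_word_syllable_count word → Raises_word_syllable_count word → ¬ Pre_word_syllable_count word) ∧ (Dom_word_syllable_count (pvRaiseWitness_word_syllable_count) ∧ Raises_word_syllable_count (pvRaiseWitness_word_syllable_count) ∧ word_syllable_count_alt (pvRaiseWitness_word_syllable_count) = pvRaiseWitnessOut_word_syllable_count)

-- ===== LEMMAS AND PROOFS =====

-- A's loop over the lowered character list (definitionally the loop inside word_syllable_count).
def pvALoop (w : List Char) : Int :=
  (PySem.List.pyRange 1 (PySem.List.len w) 1).foldl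
    (fun acc i =>
      if PySem.List.pyGetD w i ' ' ∈ pvVowels ∧ PySem.List.pyGetD w (i - 1) ' ' ∉ pvVowels then
        acc + 1 else acc)
    (if PySem.List.pyGetD w 0 ' ' ∈ pvVowels then (1 : Int) else 0)

-- Proof-side flag fold: run-start count together with "last char was a vowel".
def pvBFold (w : List Char) : Int × Bool :=
  w.foldl (fun st c =>
    let v : Bool := decide (c ∈ pvVowels)
    (if v && !st.2 then st.1 + 1 else st.1, v)) ((0 : Int), false)

-- Run-start counter with an explicit previous-char flag (front recursion).
def pvCnt (prev : Bool) : List Char → Int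
  | [] => 0
  | c :: t => (if decide (c ∈ pvVowels) && !prev then 1 else 0) + pvCnt (decide (c ∈ pvVowels)) t

-- Token counter matching split₀.go's state: inword = "currently inside a token".
def pvCntTok (inword : Bool) : List Char → Int
  | [] => if inword then 1 else 0
  | c :: t => if PySem.Chars.isspace c then (if inword then 1 else 0) + pvCntTok false t
              else pvCntTok true t

lemma pvGetD_append_left (u : List Char) (z : Char) (i : Int) (h0 : 0 ≤ i) (h1 : i < u.length) :
    PySem.List.pyGetD (u ++ [z]) i ' ' = PySem.List.pyGetD u i ' ' := by
  rw [PySem.List.pyGetD_eq_getElem _ _ h0 (by simp; omega),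
      PySem.List.pyGetD_eq_getElem _ _ h0 h1, List.getElem_append_left (by omega)]

-- A's loop gains exactly the new-group test for the appended character.
lemma pvALoop_append (u : List Char) (z : Char) (hu : u ≠ []) :
    pvALoop (u ++ [z]) = pvALoop u +
      (if z ∈ pvVowels ∧ u.getLast hu ∉ pvVowels then 1 else 0) := by
  unfold pvALoop
  simp only [PySem.List.len_eq, List.length_append, List.length_cons, List.length_nil]
  have hlen : ((u.length + 1 : Nat) : Int) = (u.length : Int) + 1 := by push_cast; ring
  rw [hlen, PySem.List.pyRange_one_succ_right (by
    have := List.length_pos_iff.mpr hu; omega : (1:Int) ≤ u.length)]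
  rw [List.foldl_append]
  have h0 : PySem.List.pyGetD (u ++ [z]) 0 ' ' = PySem.List.pyGetD u 0 ' ' := by
    exact pvGetD_append_left u z 0 le_rfl (by exact_mod_cast List.length_pos_iff.mpr hu)
  have hcong : (PySem.List.pyRange 1 (u.length : Int) 1).foldl
      (fun acc i => if PySem.List.pyGetD (u ++ [z]) i ' ' ∈ pvVowels ∧ PySem.List.pyGetD (u ++ [z]) (i - 1) ' ' ∉ pvVowels then acc + 1 else acc)
      (if PySem.List.pyGetD (u ++ [z]) 0 ' ' ∈ pvVowels then (1:Int) else 0)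
    = (PySem.List.pyRange 1 (u.length : Int) 1).foldl
      (fun acc i => if PySem.List.pyGetD u i ' ' ∈ pvVowels ∧ PySem.List.pyGetD u (i - 1) ' ' ∉ pvVowels then acc + 1 else acc)
      (if PySem.List.pyGetD u 0 ' ' ∈ pvVowels then (1:Int) else 0) := by
    rw [h0]
    apply PySem.List.foldl_congr_mem
    intro acc i hi
    have hmem := (PySem.List.mem_pyRange_one).1 hi
    rw [pvGetD_append_left u z i (by omega) hmem.2,
        pvGetD_append_left u z (i-1) (by omega) (by omega)]
  rw [hcong]
  have hz : PySem.List.pyGetD (u ++ [z]) (u.length : Int) ' ' = z := by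
    rw [PySem.List.pyGetD_eq_getElem _ _ (by positivity) (by simp)]
    simp
  have hlast : PySem.List.pyGetD (u ++ [z]) ((u.length : Int) - 1) ' ' = u.getLast hu := by
    have hp : 0 < u.length := List.length_pos_iff.mpr hu
    rw [PySem.List.pyGetD_eq_getElem _ _ (by omega) (by simp)]
    rw [List.getElem_append_left (by omega)]
    rw [List.getLast_eq_getElem]
    congr 1
    omega
  simp only [List.foldl_cons, List.foldl_nil, hz, hlast]
  split_ifs <;> omega

-- Invariant: the flag fold computes A's loop value together with "last char was a vowel";
-- the value is nonnegative, and at least 1 when the word ends in a vowel.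
lemma pvMain (u : List Char) (h : u ≠ []) :
    pvBFold u = (pvALoop u, decide (u.getLast h ∈ pvVowels)) ∧ 0 ≤ pvALoop u ∧
      (u.getLast h ∈ pvVowels → 1 ≤ pvALoop u) := by
  induction u using List.reverseRecOn with
  | nil => exact absurd rfl h
  | append_singleton u z ih =>
    rcases eq_or_ne u [] with rfl | hu
    · simp only [List.nil_append]
      constructor
      · unfold pvBFold pvALoop
        simp only [List.foldl_cons, List.foldl_nil, PySem.List.len_eq, List.length_cons,
          List.length_nil, PySem.List.pyGetD_zero_cons, List.getLast_singleton]
        by_cases hz : z ∈ pvVowels <;> simp [hz]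
      · unfold pvALoop
        simp only [PySem.List.len_eq, List.length_cons, List.length_nil,
          PySem.List.pyGetD_zero_cons, List.getLast_singleton]
        by_cases hz : z ∈ pvVowels <;> simp [hz]
    · obtain ⟨ihf, ihn, ihp⟩ := ih hu
      have hB : pvBFold (u ++ [z]) =
          (if decide (z ∈ pvVowels) && !(pvBFold u).2 then (pvBFold u).1 + 1 else (pvBFold u).1,
            decide (z ∈ pvVowels)) := by
        unfold pvBFold
        rw [List.foldl_append]
        rfl
      have hA := pvALoop_append u z hu
      have hlast : (u ++ [z]).getLast (by simp) = z := by simp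
      rw [hB, ihf, hA]
      refine ⟨?_, ?_, ?_⟩
      · simp only [hlast]
        by_cases hz : z ∈ pvVowels <;> by_cases hl : u.getLast hu ∈ pvVowels <;>
          simp [hz, hl]
      · split_ifs <;> omega
      · intro hzmem
        rw [hlast] at hzmem
        by_cases hl : u.getLast hu ∈ pvVowels
        · have := ihp hl
          split_ifs <;> omega
        · have h1 : (if z ∈ pvVowels ∧ u.getLast hu ∉ pvVowels then (1:Int) else 0) = 1 := by
            simp [hzmem, hl]
          omega

-- The flag fold computes pvCnt.
lemma pvFoldl_cnt (w : List Char) : ∀ (a : Int) (p : Bool),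
    (w.foldl (fun st c =>
      let v : Bool := decide (c ∈ pvVowels)
      (if v && !st.2 then st.1 + 1 else st.1, v)) (a, p)).1 = a + pvCnt p w := by
  induction w with
  | nil => intro a p; simp [pvCnt]
  | cons c t ih =>
    intro a p
    simp only [List.foldl_cons, pvCnt, ih]
    split_ifs <;> simp_all <;> try omega

-- The masked character is a space exactly when the original is not a vowel.
lemma pvIsspace_mask (c : Char) :
    PySem.Chars.isspace (if c ∈ pvVowels then c else ' ') = !decide (c ∈ pvVowels) := by
  by_cases h : c ∈ pvVowels
  · simp only [h, if_pos, decide_true, Bool.not_true]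
    fin_cases h <;> decide
  · simp [h]
    decide

-- Token count of the mask = run-start count of the word (plus one open token).
lemma pvCntTok_mask (w : List Char) : ∀ (b : Bool),
    pvCntTok b (w.map (fun c => if c ∈ pvVowels then c else ' ')) =
      pvCnt b w + (if b then 1 else 0) := by
  induction w with
  | nil => intro b; simp [pvCntTok, pvCnt]
  | cons c t ih =>
    intro b
    simp only [List.map_cons, pvCntTok, pvCnt, pvIsspace_mask c, ih]
    by_cases h : c ∈ pvVowels <;> by_cases hb : b <;> simp [h, hb] <;> omega

-- split₀.go produces acc plus exactly the tokens pvCntTok counts.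
lemma pvGo_len (s : List Char) : ∀ (cur : List Char) (acc : List (List Char)),
    ((PySem.Chars.split₀.go s cur acc).length : Int) = acc.length + pvCntTok (!cur.isEmpty) s := by
  induction s with
  | nil =>
    intro cur acc
    by_cases h : cur.isEmpty <;> simp [PySem.Chars.split₀.go, pvCntTok, h]
  | cons c rest ih =>
    intro cur acc
    by_cases hs : PySem.Chars.isspace c
    · by_cases h : cur.isEmpty
      · simp [PySem.Chars.split₀.go, hs, h, ih, pvCntTok]
      · simp [PySem.Chars.split₀.go, hs, h, ih, pvCntTok]
        omega
    · simp [PySem.Chars.split₀.go, hs, ih, pvCntTok]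

-- Chain: number of split() tokens of the mask = A's loop value.
lemma pvSplit_len (w : List Char) (h : w ≠ []) :
    (((PySem.Chars.split₀ (w.map (fun c => if c ∈ pvVowels then c else ' '))).length : Int))
      = pvALoop w := by
  have h1 := pvGo_len (w.map (fun c => if c ∈ pvVowels then c else ' ')) [] []
  have h2 := pvCntTok_mask w false
  have h3 := pvFoldl_cnt w 0 false
  have h4 := (pvMain w h).1
  unfold PySem.Chars.split₀
  rw [h1]
  simp only [List.isEmpty_nil, Bool.not_true, List.length_nil, Int.natCast_zero, zero_add] at *
  rw [h2]
  have : pvCnt false w = pvALoop w := by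
    have := congrArg Prod.fst h4
    unfold pvBFold at this
    rw [h3] at this
    simpa using this
  simp [this]

lemma pvEndsE (w : List Char) (h : w ≠ []) :
    PySem.Chars.endswith w ['e'] = true ↔ w.getLast h = 'e' := by
  rw [PySem.Chars.endswith_iff]
  constructor
  · rintro ⟨t, rfl⟩; simp
  · intro he
    exact ⟨w.dropLast, by rw [← he]; exact List.dropLast_concat_getLast h⟩

-- ===== VERDICT (by name: the statement is the Claim_ definition above) =====
theorem word_syllable_count_spec : Claim_equal_word_syllable_count := by
  intro word _ hpre
  unfold Spec_word_syllable_count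
  have hw : PySem.Chars.lower word.toList ≠ [] := by
    have ht : word.toList ≠ [] := fun hnil => hpre (String.toList_eq_nil_iff.mp hnil)
    simp [PySem.Chars.lower, ht]
  change (let w := PySem.Chars.lower word.toList
     let count := pvALoop w
     let count := if PySem.Chars.endswith w ['e'] then count - 1 else count
     let count := if PySem.Chars.endswith w ['l', 'e'] then count + 1 else count
     if count = 0 then count + 1 else count)
   = (let w := PySem.Chars.lower word.toList
      let count := (((PySem.Chars.split₀ (w.map (fun c => if c ∈ pvVowels then c else ' '))).length : Int))
                   + (if PySem.Chars.endswith w ['l', 'e'] then (1 : Int) else 0)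
                   - (if PySem.Chars.endswith w ['e'] then (1 : Int) else 0)
      max count 1)
  simp only [pvSplit_len _ hw]
  obtain ⟨-, hn, hp⟩ := pvMain _ hw
  by_cases he : PySem.Chars.endswith (PySem.Chars.lower word.toList) ['e'] = true
  · have h1 : 1 ≤ pvALoop (PySem.Chars.lower word.toList) := by
      apply hp
      rw [(pvEndsE _ hw).1 he]
      decide
    simp only [he, if_true]
    by_cases hle : PySem.Chars.endswith (PySem.Chars.lower word.toList) ['l', 'e'] = true <;>
      simp only [hle] <;> split_ifs <;> omega
  · simp only [he]
    by_cases hle : PySem.Chars.endswith (PySem.Chars.lower word.toList) ['l', 'e'] = true <;>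
      simp only [hle] <;> split_ifs <;> omega

theorem word_syllable_count_raises : Claim_raises_word_syllable_count := by
  unfold Claim_raises_word_syllable_count
  exact ⟨fun w _ hr hp => hp hr, by decide⟩

-- The crash-fix fact in plain terms: B returns 1 on the empty string (where A raises).
theorem word_syllable_count_alt_empty_ok : word_syllable_count_alt "" = 1 :=
  word_syllable_count_raises.2.2.2
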